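-- pv_equiv track=rewrite | github.com/JBLarson/wikiVector | src/pipeline_enrichment/processing/extract_link_graph.py | is_special_page
-- ===== SOURCE A (Python) =====
-- def is_special_page(normalized_title: str) -> bool:
--     """Filter out special pages that shouldn't be in the link graph."""
--     if not normalized_title:
--         return True
--
--     special_prefixes = [
--         'file:', 'image:', 'category:', 'template:',
--         'wikipedia:', 'help:', 'portal:', 'user:',
--         'talk:', 'mediawiki:', 'special:', 'draft:'
--     ]
--
--     return any(normalized_title.startswith(prefix) for prefix in special_prefixes)
-- ===== SOURCE B (Python) =====
-- _NAMESPACES = frozenset({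
--     'file', 'image', 'category', 'template',
--     'wikipedia', 'help', 'portal', 'user',
--     'talk', 'mediawiki', 'special', 'draft'
-- })
--
--
-- def is_special_page(normalized_title: str) -> bool:
--     """Filter out special pages that shouldn't be in the link graph."""
--     if not normalized_title:
--         return True
--     head, sep, _ = normalized_title.partition(':')
--     return bool(sep) and head in _NAMESPACES
-- ===== Notes on version B (the rewrite author's own statement) =====
-- stated objective: idiomatic
-- what changed: B splits the title once at the first colon and looks the head up in a set of namespace names, instead of testing all 12 colon-terminated prefixes with startswith.
import Mathlib
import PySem

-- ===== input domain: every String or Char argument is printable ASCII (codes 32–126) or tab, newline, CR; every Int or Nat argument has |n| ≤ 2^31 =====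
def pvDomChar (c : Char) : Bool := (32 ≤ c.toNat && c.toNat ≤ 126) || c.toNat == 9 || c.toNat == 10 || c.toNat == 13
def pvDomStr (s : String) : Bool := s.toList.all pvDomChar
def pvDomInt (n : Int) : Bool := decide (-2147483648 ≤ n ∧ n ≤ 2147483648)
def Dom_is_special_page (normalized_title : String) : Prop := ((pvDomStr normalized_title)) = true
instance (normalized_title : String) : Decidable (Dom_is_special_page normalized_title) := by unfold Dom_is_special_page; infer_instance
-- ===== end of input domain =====

-- B replaces the 12-prefix startswith scan by one partition at the first colon and a set lookup (idiomatic).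


-- ===== PORT A =====
def is_special_page (normalized_title : String) : Bool :=
  if normalized_title = "" then true
  else
    (["file:", "image:", "category:", "template:",
      "wikipedia:", "help:", "portal:", "user:",
      "talk:", "mediawiki:", "special:", "draft:"]).any
      (fun pre => PySem.Str.startswith normalized_title pre)

-- ===== PORT B =====
-- frozenset of namespace names
def pvNamespaces : PySem.Set String :=
  PySem.Set.ofList
    ["file", "image", "category", "template",
     "wikipedia", "help", "portal", "user",
     "talk", "mediawiki", "special", "draft"]

-- str.partition(':') ported by hand (PySem has no partition): head = chars before the
-- first ':', sep is non-empty iff a ':' occurs (dropWhile nonempty); exact on all strings.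
def is_special_page_alt (normalized_title : String) : Bool :=
  if normalized_title = "" then true
  else
    let head := normalized_title.toList.takeWhile (fun c => c ≠ ':')
    let sepAndTail := normalized_title.toList.dropWhile (fun c => c ≠ ':')
    decide (sepAndTail ≠ []) && pvNamespaces.contains (String.ofList head)

-- ===== PRECONDITION & SPEC =====
def Spec_is_special_page (normalized_title : String) (out : Bool) : Prop := out = is_special_page_alt normalized_title
instance (normalized_title : String) (out : Bool) : Decidable (Spec_is_special_page normalized_title out) := by unfold Spec_is_special_page; infer_instance

-- ===== CLAIM (what is proved, stated in full; the proofs are below) =====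
def Claim_equal_is_special_page : Prop := ∀ (normalized_title : String), Dom_is_special_page normalized_title → Spec_is_special_page normalized_title (is_special_page normalized_title)

-- ===== LEMMAS AND PROOFS =====

theorem pv_takeWhile_colon (p t : List Char) (hp : ':' ∉ p) :
    (p ++ ':' :: t).takeWhile (fun c => c ≠ ':') = p := by
  induction p with
  | nil => simp
  | cons a as ih =>
    simp only [List.mem_cons, not_or] at hp
    rw [List.cons_append, List.takeWhile_cons, if_pos (by simp; exact fun h => hp.1 h.symm),
      ih hp.2]

/-- `name ++ ":"` is a prefix of `l` iff `l` contains a colon and the text before the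
first colon is exactly `name` (for colon-free `name`). -/
theorem pv_prefix_colon_iff (p l : List Char) (hp : ':' ∉ p) :
    (p ++ [':']) <+: l ↔ (':' ∈ l ∧ l.takeWhile (fun c => c ≠ ':') = p) := by
  constructor
  · rintro ⟨t, rfl⟩
    rw [List.append_assoc]
    exact ⟨by simp, pv_takeWhile_colon p t hp⟩
  · rintro ⟨hm, hp'⟩
    have hsplit := List.takeWhile_append_dropWhile (p := fun c => decide (c ≠ ':')) (l := l)
    have hdne : l.dropWhile (fun c => decide (c ≠ ':')) ≠ [] := by
      intro h
      rw [h, List.append_nil, hp'] at hsplit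
      exact hp (hsplit ▸ hm)
    obtain ⟨x, xs, hx⟩ := List.exists_cons_of_ne_nil hdne
    have hh := List.head_dropWhile_not (fun c => decide (c ≠ ':')) hdne
    simp only [hx, List.head_cons, decide_eq_false_iff_not, not_not] at hh
    refine ⟨xs, ?_⟩
    rw [← hsplit, hp', hx, hh]
    simp

theorem pv_has_colon_iff (l : List Char) :
    l.dropWhile (fun c => c ≠ ':') ≠ [] ↔ ':' ∈ l := by
  rw [Ne, List.dropWhile_eq_nil_iff]
  constructor
  · intro h
    by_contra hm
    exact h fun x hx => by simp; rintro rfl; exact hm hx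
  · intro hm h
    have := h ':' hm
    simp at this

theorem pv_ofList_eq_iff (a : List Char) (s : String) :
    String.ofList a = s ↔ a = s.toList := by
  constructor
  · rintro rfl; exact String.toList_ofList.symm
  · rintro rfl; exact String.ofList_toList

-- ===== VERDICT (by name: the statement is the Claim_ definition above) =====
set_option maxHeartbeats 2000000 in
theorem is_special_page_spec : Claim_equal_is_special_page := by
  intro s _
  unfold Spec_is_special_page is_special_page is_special_page_alt
  by_cases hs : s = ""
  · simp [hs]
  · simp only [hs, reduceIte]
    rw [Bool.eq_iff_iff]
    simp only [List.any_cons, List.any_nil, Bool.or_eq_true, Bool.and_eq_true,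
      decide_eq_true_eq, PySem.Str.startswith_eq, PySem.Chars.startswith_iff,
      PySem.Set.contains_iff, pvNamespaces, PySem.Set.mem_ofList, List.mem_cons,
      List.not_mem_nil, or_false, pv_ofList_eq_iff, pv_has_colon_iff]
    have h := fun (p : List Char) (hp : ':' ∉ p) => pv_prefix_colon_iff p s.toList hp
    rw [show ("file:".toList) = "file".toList ++ [':'] by decide,
        show ("image:".toList) = "image".toList ++ [':'] by decide,
        show ("category:".toList) = "category".toList ++ [':'] by decide,
        show ("template:".toList) = "template".toList ++ [':'] by decide,
        show ("wikipedia:".toList) = "wikipedia".toList ++ [':'] by decide,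
        show ("help:".toList) = "help".toList ++ [':'] by decide,
        show ("portal:".toList) = "portal".toList ++ [':'] by decide,
        show ("user:".toList) = "user".toList ++ [':'] by decide,
        show ("talk:".toList) = "talk".toList ++ [':'] by decide,
        show ("mediawiki:".toList) = "mediawiki".toList ++ [':'] by decide,
        show ("special:".toList) = "special".toList ++ [':'] by decide,
        show ("draft:".toList) = "draft".toList ++ [':'] by decide,
        h _ (by decide), h _ (by decide), h _ (by decide), h _ (by decide),
        h _ (by decide), h _ (by decide), h _ (by decide), h _ (by decide),
        h _ (by decide), h _ (by decide), h _ (by decide), h _ (by decide)]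
    simp only [Bool.false_eq_true, or_false]
    generalize List.takeWhile (fun c => decide (c ≠ ':')) s.toList = w
    generalize (':' ∈ s.toList) = c
    generalize ("file".toList) = n1
    generalize ("image".toList) = n2
    generalize ("category".toList) = n3
    generalize ("template".toList) = n4
    generalize ("wikipedia".toList) = n5
    generalize ("help".toList) = n6
    generalize ("portal".toList) = n7
    generalize ("user".toList) = n8
    generalize ("talk".toList) = n9
    generalize ("mediawiki".toList) = n10
    generalize ("special".toList) = n11
    generalize ("draft".toList) = n12
    tauto
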